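-- pv_equiv track=rewrite | github.com/Meena-Bharani/CodingSheet | CodingSheet/Arrays.py | left_rotation
-- ===== SOURCE A (Python) =====
-- def left_rotation(nums, k):
--     try:
--         k = k % len(nums)
--         l, r = 0, len(nums) - 1
--         while l < r:
--             nums[l], nums[r] = nums[r], nums[l]
--             l, r = l + 1, r - 1
--         l, r = 0, k - 1
--         while l < r:
--             nums[l], nums[r] = nums[r], nums[l]
--             l, r = l + 1, r - 1
--         l, r = k, len(nums) - 1
--         while l < r:
--             nums[l], nums[r] = nums[r], nums[l]
--             l, r = l + 1, r - 1
--         return nums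
--     except Exception as e:
--         raise Exception('Error: ', e)
-- ===== SOURCE B (Python) =====
-- def left_rotation(nums, k):
--     # Same observable behaviour as A (which rotates RIGHT by k): one slice
--     # concatenation assigned back in place instead of three reversal loops.
--     j = len(nums) - k % len(nums)
--     nums[:] = nums[j:] + nums[:j]
--     return nums
-- ===== Notes on version B (the rewrite author's own statement) =====
-- stated objective: simpler
-- what changed: Replaces A's three Python-level two-pointer reversal loops with a single C-level slice concatenation nums[j:] + nums[:j] (j = len - k % len) assigned back in place.
-- outside the precondition, e.g. on left_rotation([], 3): A raises Exception, B raises ZeroDivisionError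
import Mathlib
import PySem

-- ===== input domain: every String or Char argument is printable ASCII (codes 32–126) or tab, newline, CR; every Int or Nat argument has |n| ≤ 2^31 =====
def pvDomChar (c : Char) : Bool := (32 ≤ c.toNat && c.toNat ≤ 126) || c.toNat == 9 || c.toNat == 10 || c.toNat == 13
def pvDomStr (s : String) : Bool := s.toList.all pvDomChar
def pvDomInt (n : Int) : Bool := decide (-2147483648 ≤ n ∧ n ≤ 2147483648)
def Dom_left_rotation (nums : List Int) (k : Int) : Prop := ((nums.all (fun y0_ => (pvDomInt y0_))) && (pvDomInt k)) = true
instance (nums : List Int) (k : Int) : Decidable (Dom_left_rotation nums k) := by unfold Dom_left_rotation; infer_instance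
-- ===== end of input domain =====

-- B replaces the three in-place reversal loops with one slice concatenation; equivalence is
-- about the return value (both Pythons also mutate nums in place to the same final contents).

-- ===== PORT A =====
-- nums[l], nums[r] = nums[r], nums[l]  (IndexError cannot occur on the indices A reaches)
def pySwap (xs : List Int) (l r : Int) : List Int :=
  match PySem.List.pyGet? xs l, PySem.List.pyGet? xs r with
  | some a, some b => PySem.List.pySetD (PySem.List.pySetD xs l b) r a
  | _, _ => xs

-- while l < r: swap; l, r = l + 1, r - 1
def revLoop (xs : List Int) (l r : Int) : List Int :=
  if _h : l < r then revLoop (pySwap xs l r) (l + 1) (r - 1) else xs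
termination_by (r - l).toNat
decreasing_by omega

def left_rotation (nums : List Int) (k : Int) : List Int :=
  let k' := PySem.Int.mod k nums.length
  let s1 := revLoop nums 0 ((nums.length : Int) - 1)
  let s2 := revLoop s1 0 (k' - 1)
  revLoop s2 k' ((nums.length : Int) - 1)

-- ===== PORT B =====
def left_rotation_alt (nums : List Int) (k : Int) : List Int :=
  let j : Int := (nums.length : Int) - PySem.Int.mod k nums.length
  PySem.List.slice nums (some j) none ++ PySem.List.slice nums none (some j)

-- ===== PRECONDITION & SPEC =====
-- A raises Exception('Error: ', ZeroDivisionError) on the empty list (k % len(nums)); B raises there too.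
def Pre_left_rotation (nums : List Int) (k : Int) : Prop := nums ≠ []
instance (nums : List Int) (k : Int) : Decidable (Pre_left_rotation nums k) := by unfold Pre_left_rotation; infer_instance
def pvWitness_left_rotation : List Int × Int := ([1, 2, 3], 1)

def Spec_left_rotation (nums : List Int) (k : Int) (out : List Int) : Prop := out = left_rotation_alt nums k
instance (nums : List Int) (k : Int) (out : List Int) : Decidable (Spec_left_rotation nums k out) := by unfold Spec_left_rotation; infer_instance

-- ===== CLAIM (what is proved, stated in full; the proofs are below) =====
def Claim_equal_left_rotation : Prop := ∀ (nums : List Int) (k : Int), Dom_left_rotation nums k → Pre_left_rotation nums k → Spec_left_rotation nums k (left_rotation nums k)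

-- ===== LEMMAS AND PROOFS =====

lemma set_append_length (pre : List Int) (x v : Int) (t : List Int) :
    (pre ++ x :: t).set pre.length v = pre ++ v :: t := by
  induction pre with
  | nil => rfl
  | cons h tl ih => simp [ih]

lemma pySwap_mid (pre mid post : List Int) (a b : Int) :
    pySwap (pre ++ a :: (mid ++ b :: post)) pre.length ((pre.length : Int) + mid.length + 1)
      = pre ++ b :: (mid ++ a :: post) := by
  have hr : ((pre.length : Int) + mid.length + 1) = (((pre ++ a :: mid).length : Nat) : Int) := by
    simp; omega
  have hget_l : PySem.List.pyGet? (pre ++ a :: (mid ++ b :: post)) pre.length = some a :=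
    PySem.List.pyGet?_append_length pre (mid ++ b :: post) a
  have hget_r : PySem.List.pyGet? (pre ++ a :: (mid ++ b :: post)) ((pre.length : Int) + mid.length + 1) = some b := by
    rw [hr]
    simpa [List.append_assoc] using PySem.List.pyGet?_append_length (pre ++ a :: mid) post b
  simp only [pySwap, hget_l, hget_r]
  rw [PySem.List.pySetD_natCast, hr, PySem.List.pySetD_natCast]
  rw [set_append_length pre a b (mid ++ b :: post)]
  have hre : pre ++ b :: (mid ++ b :: post) = (pre ++ b :: mid) ++ b :: post := by
    simp [List.append_assoc]
  rw [hre]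
  have hlen : (pre ++ a :: mid).length = (pre ++ b :: mid).length := by simp
  rw [hlen, set_append_length (pre ++ b :: mid) b a post]
  simp [List.append_assoc]

lemma revLoop_spec (n : Nat) : ∀ (seg pre post : List Int), seg.length = n →
    revLoop (pre ++ (seg ++ post)) pre.length ((pre.length : Int) + seg.length - 1)
      = pre ++ (seg.reverse ++ post) := by
  induction n using Nat.strong_induction_on with
  | _ n ih =>
    intro seg pre post hlen
    rcases seg with _ | ⟨a, t⟩
    · rw [revLoop, dif_neg (by simp only [List.length_nil]; push_cast; omega)]
      simp
    · rcases t.eq_nil_or_concat with rfl | ⟨mid, b, rfl⟩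
      · rw [revLoop, dif_neg (by simp only [List.length_cons, List.length_nil]; push_cast; omega)]
        simp
      · simp only [List.concat_eq_append] at hlen ⊢
        have hshape : (a :: (mid ++ [b])) ++ post = a :: (mid ++ b :: post) := by
          simp [List.append_assoc]
        rw [hshape, revLoop]
        have hc : (pre.length : Int) < (pre.length : Int) + (a :: (mid ++ [b])).length - 1 := by
          simp; omega
        rw [dif_pos hc]
        have harg2 : (pre.length : Int) + (a :: (mid ++ [b])).length - 1
            = (pre.length : Int) + mid.length + 1 := by simp; omega
        rw [harg2, pySwap_mid pre mid post a b]
        have hre : pre ++ b :: (mid ++ a :: post) = (pre ++ [b]) ++ (mid ++ (a :: post)) := by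
          simp [List.append_assoc]
        have hl1 : (pre.length : Int) + 1 = ((pre ++ [b]).length : Int) := by simp
        have hr1 : (pre.length : Int) + mid.length + 1 - 1
            = ((pre ++ [b]).length : Int) + mid.length - 1 := by simp; omega
        rw [hre, hl1, hr1]
        rw [ih mid.length (by simp at hlen ⊢; omega) mid (pre ++ [b]) (a :: post) rfl]
        simp [List.append_assoc]

lemma revLoop_whole (xs : List Int) :
    revLoop xs 0 ((xs.length : Int) - 1) = xs.reverse := by
  have := revLoop_spec xs.length xs [] [] rfl
  simpa using this

lemma revLoop_prefix (xs : List Int) (m : Nat) (hm : m ≤ xs.length) :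
    revLoop xs 0 ((m : Int) - 1) = (xs.take m).reverse ++ xs.drop m := by
  have := revLoop_spec (xs.take m).length (xs.take m) [] (xs.drop m) rfl
  simp only [List.nil_append, List.length_nil, Nat.cast_zero, zero_add] at this
  rw [List.length_take, Nat.min_eq_left hm] at this
  simpa using this

lemma revLoop_suffix (xs : List Int) (m : Nat) (hm : m ≤ xs.length) :
    revLoop xs (m : Int) ((xs.length : Int) - 1) = xs.take m ++ (xs.drop m).reverse := by
  have h := revLoop_spec (xs.drop m).length (xs.drop m) (xs.take m) [] rfl
  simp only [List.append_nil] at h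
  rw [List.take_append_drop] at h
  rw [List.length_take, Nat.min_eq_left hm, List.length_drop] at h
  have harg : ((m : Int)) + ((xs.length - m : Nat) : Int) - 1 = (xs.length : Int) - 1 := by
    omega
  rw [harg] at h
  exact h

-- ===== VERDICT (by name: the statement is the Claim_ definition above) =====
theorem left_rotation_spec : Claim_equal_left_rotation := by
  intro nums k _hdom hpre
  have hn : 0 < nums.length := List.length_pos_of_ne_nil hpre
  have hnpos : (0 : Int) < (nums.length : Int) := by exact_mod_cast hn
  set m : Int := PySem.Int.mod k nums.length with hm
  have hm0 : 0 ≤ m := PySem.Int.mod_nonneg k hnpos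
  have hmlt : m < nums.length := PySem.Int.mod_lt k hnpos
  set mN : Nat := m.toNat with hmN
  have hmcast : (mN : Int) = m := by omega
  have hmle : mN ≤ nums.length := by omega
  have hA : left_rotation nums k
      = revLoop (revLoop (revLoop nums 0 ((nums.length : Int) - 1)) 0 (m - 1)) m ((nums.length : Int) - 1) := rfl
  have hB : left_rotation_alt nums k
      = PySem.List.slice nums (some ((nums.length : Int) - m)) none
          ++ PySem.List.slice nums none (some ((nums.length : Int) - m)) := rfl
  unfold Spec_left_rotation
  rw [hA, hB, revLoop_whole nums]
  rw [← hmcast, revLoop_prefix nums.reverse mN (by simpa using hmle)]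
  set zs := (nums.reverse.take mN).reverse ++ nums.reverse.drop mN with hzs
  have hzslen : zs.length = nums.length := by simp [hzs]; omega
  have hx : ((nums.reverse.take mN).reverse).length = mN := by simp; omega
  have hzs_take : zs.take mN = (nums.reverse.take mN).reverse := by
    rw [hzs, List.take_append_of_le_length (by rw [hx]), List.take_of_length_le (by rw [hx])]
  have hzs_drop : zs.drop mN = nums.reverse.drop mN := by
    rw [hzs, List.drop_append_of_le_length (by rw [hx]), List.drop_of_length_le (by rw [hx])]
    simp
  have hlen1 : ((nums.length : Int) - 1) = ((zs.length : Int) - 1) := by rw [hzslen]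
  rw [hlen1, revLoop_suffix zs mN (by omega), hzs_take, hzs_drop]
  have hj : (0 : Int) ≤ (nums.length : Int) - (mN : Int) := by omega
  rw [PySem.List.slice_from _ hj, PySem.List.slice_to _ hj]
  have hjN : ((nums.length : Int) - (mN : Int)).toNat = nums.length - mN := by omega
  rw [hjN]
  rw [List.take_reverse, List.drop_reverse]
  simp
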